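-- pv_equiv track=rewrite | github.com/Saifa36622/fibo-python | pass_loop.py | number_and_hashtag2
-- ===== SOURCE A (Python) =====
-- def number_and_hashtag2(x):
--     a = ""
--     z = 1
--     a2 = ""
--     a3 =[]
--     a4 = []
--     total = ""
--     for i in range (x):
--         a = str(z) + a
--         a = "#" + a
--         z += 1
--         a2 = a2 + a
--     return a2
-- ===== SOURCE B (Python) =====
-- def number_and_hashtag2(x):
--     pieces = ["#" + str(j) for j in range(1, x + 1)]
--     rows = ["".join(reversed(pieces[:k])) for k in range(1, x + 1)]
--     return "".join(rows)
-- ===== Notes on version B (the rewrite author's own statement) =====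
-- stated objective: alternative
-- what changed: A maintains a running row string and an accumulator in one incremental pass; B keeps no running state: it precomputes the '#j' pieces once, assembles each row from scratch as a joined reversed prefix of that list, and joins all rows at the end.
import Mathlib
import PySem

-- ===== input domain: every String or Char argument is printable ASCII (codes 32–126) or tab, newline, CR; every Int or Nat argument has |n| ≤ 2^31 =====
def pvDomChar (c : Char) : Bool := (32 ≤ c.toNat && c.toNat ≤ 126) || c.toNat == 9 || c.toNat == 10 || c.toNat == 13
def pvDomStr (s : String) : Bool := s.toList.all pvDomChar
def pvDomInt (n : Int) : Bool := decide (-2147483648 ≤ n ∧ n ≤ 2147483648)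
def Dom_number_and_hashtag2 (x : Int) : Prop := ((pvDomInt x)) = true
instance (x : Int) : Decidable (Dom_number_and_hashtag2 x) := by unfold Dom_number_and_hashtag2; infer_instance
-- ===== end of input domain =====

-- B builds the piece strings "#j" once and assembles every row from scratch as a reversed
-- prefix of that list, joining at the end — no running row/accumulator state as in A's
-- single incremental pass. Strings are carried as List Char internally (exact for ASCII).

-- ===== PORT A =====
-- one loop step of A's body: a = str(z) + a; a = "#" + a; z += 1; a2 = a2 + a
def stepA (st : List Char × Int × List Char) : List Char × Int × List Char :=
  let a := PySem.Int.toChars st.2.1 ++ st.1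
  let a := '#' :: a
  (a, st.2.1 + 1, st.2.2 ++ a)

def number_and_hashtag2 (x : Int) : String :=
  let st := (PySem.List.pyRange 0 x 1).foldl (fun st _ => stepA st) ([], 1, [])
  String.mk st.2.2

-- ===== PORT B =====
def number_and_hashtag2_alt (x : Int) : String :=
  let pieces := (PySem.List.pyRange 1 (x + 1) 1).map (fun j => '#' :: PySem.Int.toChars j)
  -- row k = "".join(reversed(pieces[:k]))
  let rows := (PySem.List.pyRange 1 (x + 1) 1).map
    (fun k => (PySem.List.slice pieces none (some k)).reverse.flatten)
  String.mk rows.flatten   -- "".join(rows): joining with the empty separator is flatten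

-- ===== PRECONDITION & SPEC =====
def Spec_number_and_hashtag2 (x : Int) (out : String) : Prop := out = number_and_hashtag2_alt x
instance (x : Int) (out : String) : Decidable (Spec_number_and_hashtag2 x out) := by unfold Spec_number_and_hashtag2; infer_instance

-- ===== CLAIM (what is proved, stated in full; the proofs are below) =====
def Claim_equal_number_and_hashtag2 : Prop := ∀ (x : Int), Dom_number_and_hashtag2 x → Spec_number_and_hashtag2 x (number_and_hashtag2 x)

-- ===== LEMMAS AND PROOFS =====

-- the row "#n#(n-1)...#1" and the concatenation of rows 1..n
def aRow : Nat → List Char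
  | 0 => []
  | n + 1 => '#' :: PySem.Int.toChars ((n : Int) + 1) ++ aRow n

def a2Acc : Nat → List Char
  | 0 => []
  | n + 1 => a2Acc n ++ aRow (n + 1)

theorem foldl_const_step {α β : Type} (f : β → β) (init : β) (l : List α) :
    l.foldl (fun st _ => f st) init = f^[l.length] init := by
  induction l generalizing init with
  | nil => rfl
  | cons a l ih => simp [List.foldl, ih, Function.iterate_succ_apply]

theorem iterate_stepA (n : Nat) :
    stepA^[n] ([], 1, []) = (aRow n, (n : Int) + 1, a2Acc n) := by
  induction n with
  | zero => simp [aRow, a2Acc]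
  | succ n ih =>
      rw [Function.iterate_succ_apply', ih]
      simp only [stepA, aRow, a2Acc]
      refine Prod.ext ?_ (Prod.ext ?_ ?_) <;> simp <;> push_cast <;> ring_nf

theorem revflat (m : Nat) :
    (((List.range m).map (fun k : Nat => '#' :: PySem.Int.toChars (1 + (k : Int)))).reverse).flatten
      = aRow m := by
  induction m with
  | zero => simp [aRow]
  | succ m ih =>
      rw [List.range_succ]
      simp only [List.map_append, List.reverse_append, List.map_singleton,
        List.reverse_singleton, List.singleton_append, List.flatten_cons, ih]
      have h1 : (1 : Int) + (m : Int) = (m : Int) + 1 := by ring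
      rw [h1, aRow]

theorem flatten_rows (n : Nat) :
    ((List.range n).map (fun i : Nat => aRow (i + 1))).flatten = a2Acc n := by
  induction n with
  | zero => simp [a2Acc]
  | succ n ih =>
      rw [List.range_succ]
      simp only [List.map_append, List.flatten_append, ih, List.map_singleton,
        List.flatten_cons, List.flatten_nil, List.append_nil]
      rw [a2Acc]

-- ===== VERDICT (by name: the statement is the Claim_ definition above) =====
theorem number_and_hashtag2_spec : Claim_equal_number_and_hashtag2 := by
  intro x _
  unfold Spec_number_and_hashtag2 number_and_hashtag2 number_and_hashtag2_alt
  rw [foldl_const_step, PySem.List.pyRange_one, PySem.List.pyRange_one]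
  have hx : ((x + 1) - 1).toNat = (x - 0).toNat := by omega
  rw [hx]
  set n := (x - 0).toNat with hn
  simp only [List.length_map, List.length_range, List.map_map, Function.comp_def]
  rw [iterate_stepA]
  have hrow : ∀ i ∈ List.range n,
      (PySem.List.slice
          ((List.range n).map (fun k : Nat => '#' :: PySem.Int.toChars ((1 : Int) + (k : Int))))
          none (some ((1 : Int) + (i : Int)))).reverse.flatten
        = aRow (i + 1) := by
    intro i hi
    have hin : i < n := List.mem_range.mp hi
    have hc : (1 : Int) + (i : Int) = (((i + 1 : Nat)) : Int) := by push_cast; ring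
    rw [hc, PySem.List.slice_to_natCast, ← List.map_take, List.take_range]
    have hmin : min (i + 1) n = i + 1 := by omega
    rw [hmin, revflat]
  rw [List.map_congr_left hrow, flatten_rows]
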